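-- pv_equiv track=rewrite | github.com/avinash-mall/CognitiveMemoryLayer | src/consolidation/summarizer.py | _fallback_gist_type
-- ===== SOURCE A (Python) =====
-- def _fallback_gist_type(source_types: list[str]) -> str:
--     constraint_subtypes = {"goal", "state", "value", "causal", "policy"}
--     matched = [t for t in source_types if t in constraint_subtypes]
--     if len(matched) == 1:
--         return matched[0]
--     if len(matched) > 1:
--         # Multiple constraint subtypes in one cluster -- prefer the most
--         # specific first occurrence rather than collapsing to "policy".
--         return matched[0]
--     if "constraint" in source_types:
--         # Untyped constraint clusters still need a concrete cognitive
--         # subtype so alignment can preserve governing semantics.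
--         return "policy"
--     if "preference" in source_types:
--         return "preference"
--     if "semantic_fact" in source_types:
--         return "fact"
--     return "summary"
-- ===== SOURCE B (Python) =====
-- def _fallback_gist_type(source_types: list[str]) -> str:
--     # Keyword-major strategy: instead of scanning the cluster element by element,
--     # look up the first-occurrence index of each constraint subtype and keep the
--     # one with the smallest index; then walk a priority table for the fallbacks.
--     best = None  # (index, subtype) with the smallest index seen so far
--     for sub in ("goal", "state", "value", "causal", "policy"):
--         try:
--             i = source_types.index(sub)
--         except ValueError:
--             continue
--         if best is None or i < best[0]:
--             best = (i, sub)
--     if best is not None: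
--         return best[1]
--     for key, gist in (("constraint", "policy"), ("preference", "preference"), ("semantic_fact", "fact")):
--         if key in source_types:
--             return gist
--     return "summary"
-- ===== Notes on version B (the rewrite author's own statement) =====
-- stated objective: alternative
-- what changed: Inverts the traversal: instead of filtering the input element-by-element against the subtype set, B looks up each of the five subtype keywords' first-occurrence index with list.index and keeps the minimum, then resolves the fallbacks by walking a (keyword, gist) priority table.
import Mathlib
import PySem

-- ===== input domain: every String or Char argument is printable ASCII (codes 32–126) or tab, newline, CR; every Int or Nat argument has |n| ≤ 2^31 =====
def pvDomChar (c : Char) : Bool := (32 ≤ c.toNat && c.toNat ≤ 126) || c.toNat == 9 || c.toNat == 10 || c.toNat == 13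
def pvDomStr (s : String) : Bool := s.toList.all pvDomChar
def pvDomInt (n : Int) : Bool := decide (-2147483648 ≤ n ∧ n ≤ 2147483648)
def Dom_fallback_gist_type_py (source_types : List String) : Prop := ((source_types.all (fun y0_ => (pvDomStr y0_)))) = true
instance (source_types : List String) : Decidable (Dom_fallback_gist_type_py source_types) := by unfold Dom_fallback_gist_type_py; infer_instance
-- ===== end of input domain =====

-- B inverts the traversal: keyword-major minimum-first-index lookup plus a fallback
-- priority table, instead of A's element-major filter plus membership chain
-- (objective: alternative, same O(n) cost).

-- ===== PORT A =====
-- Python set literal of string constants; used only for membership tests, so a constant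
-- list with `contains` is exact.
def pvConstraintSubtypes : List String := ["goal", "state", "value", "causal", "policy"]

def fallback_gist_type_py (source_types : List String) : String :=
  let matched := source_types.filter (fun t => pvConstraintSubtypes.contains t)
  if matched.length = 1 then
    matched.headD ""          -- matched[0]; matched is nonempty on this branch, so headD is exact
  else if matched.length > 1 then
    matched.headD ""          -- matched[0]
  else if source_types.contains "constraint" then "policy"
  else if source_types.contains "preference" then "preference"
  else if source_types.contains "semantic_fact" then "fact"
  else "summary"

-- ===== PORT B =====
-- the keyword tuple and the fallback priority table of Source B
def pvSubtypeKeys : List String := ["goal", "state", "value", "causal", "policy"]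
def pvFallbackTable : List (String × String) :=
  [("constraint", "policy"), ("preference", "preference"), ("semantic_fact", "fact")]

-- one iteration of Source B's keyword loop: try/except around list.index is index? = none
def altStep (f : String → Option Nat) (best : Option (Nat × String)) (sub : String) :
    Option (Nat × String) :=
  match f sub with
  | none => best
  | some i =>
    match best with
    | none => some (i, sub)
    | some (bi, bs) => if i < bi then some (i, sub) else some (bi, bs)

-- Source B's fallback loop over the (key, gist) table with early return
def altFallback (st : List String) : List (String × String) → String
  | [] => "summary"
  | (key, gist) :: rest => if st.contains key then gist else altFallback st rest

def fallback_gist_type_py_alt (source_types : List String) : String :=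
  match pvSubtypeKeys.foldl (altStep (PySem.List.index? source_types)) none with
  | some (_, sub) => sub
  | none => altFallback source_types pvFallbackTable

-- ===== PRECONDITION & SPEC =====
def Spec_fallback_gist_type_py (source_types : List String) (out : String) : Prop := out = fallback_gist_type_py_alt source_types
instance (source_types : List String) (out : String) : Decidable (Spec_fallback_gist_type_py source_types out) := by unfold Spec_fallback_gist_type_py; infer_instance

-- ===== CLAIM (what is proved, stated in full; the proofs are below) =====
def Claim_equal_fallback_gist_type_py : Prop := ∀ (source_types : List String), Dom_fallback_gist_type_py source_types → Spec_fallback_gist_type_py source_types (fallback_gist_type_py source_types)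

-- ===== LEMMAS AND PROOFS =====

-- the keyword loop only looks at f on members of ks
theorem altFold_congr (f g : String → Option Nat) (ks : List String)
    (acc : Option (Nat × String)) (h : ∀ k ∈ ks, f k = g k) :
    ks.foldl (altStep f) acc = ks.foldl (altStep g) acc := by
  induction ks generalizing acc with
  | nil => rfl
  | cons k rest ih =>
    simp only [List.foldl_cons]
    rw [show altStep f acc k = altStep g acc k by
      simp [altStep, h k (List.mem_cons_self)]]
    exact ih _ (fun k hk => h k (List.mem_cons_of_mem _ hk))

-- when every keyword is absent the loop keeps its accumulator
theorem altFold_none (f : String → Option Nat) (ks : List String) (acc : Option (Nat × String))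
    (h : ∀ k ∈ ks, f k = none) : ks.foldl (altStep f) acc = acc := by
  induction ks generalizing acc with
  | nil => rfl
  | cons k rest ih =>
    simp only [List.foldl_cons]
    rw [show altStep f acc k = acc by simp [altStep, h k (List.mem_cons_self)]]
    exact ih _ (fun k hk => h k (List.mem_cons_of_mem _ hk))

-- shifting every index by one commutes with the keyword loop
theorem altFold_shift (f : String → Option Nat) (ks : List String) (acc : Option (Nat × String)) :
    ks.foldl (altStep (fun k => (f k).map (· + 1))) (acc.map (fun q => (q.1 + 1, q.2))) =
      (ks.foldl (altStep f) acc).map (fun q => (q.1 + 1, q.2)) := by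
  induction ks generalizing acc with
  | nil => rfl
  | cons k rest ih =>
    simp only [List.foldl_cons]
    rw [show altStep (fun k => (f k).map (· + 1)) (acc.map (fun q => (q.1 + 1, q.2))) k =
        (altStep f acc k).map (fun q => (q.1 + 1, q.2)) by
      cases hf : f k with
      | none => simp [altStep, hf]
      | some i =>
        cases acc with
        | none => simp [altStep, hf]
        | some q =>
          simp only [altStep, hf, Option.map_some]
          by_cases hlt : i < q.1
          · rw [if_pos hlt, if_pos (by omega)]; rfl
          · rw [if_neg hlt, if_neg (by omega)]; rfl]
    exact ih _

-- an accumulator with index 0 is never replaced (Nat comparison i < 0 is false)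
theorem altFold_keep_zero (f : String → Option Nat) (ks : List String) (t : String) :
    ks.foldl (altStep f) (some (0, t)) = some (0, t) := by
  induction ks with
  | nil => rfl
  | cons k rest ih =>
    simp only [List.foldl_cons]
    rw [show altStep f (some (0, t)) k = some (0, t) by
      cases hf : f k with
      | none => simp [altStep, hf]
      | some i => simp [altStep, hf]]
    exact ih

-- if keyword t has index 0 and all other keywords have positive index, t wins
theorem altFold_zero (f : String → Option Nat) (ks : List String) (t : String)
    (acc : Option (Nat × String)) (ht : f t = some 0) (hmem : t ∈ ks)
    (hpos : ∀ k ∈ ks, k ≠ t → ∀ i, f k = some i → 0 < i)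
    (hacc : ∀ q, acc = some q → 0 < q.1) :
    ks.foldl (altStep f) acc = some (0, t) := by
  induction ks generalizing acc with
  | nil => exact absurd hmem (List.not_mem_nil)
  | cons k rest ih =>
    simp only [List.foldl_cons]
    by_cases hk : k = t
    · subst hk
      have : altStep f acc k = some (0, k) := by
        cases acc with
        | none => simp [altStep, ht]
        | some q =>
          have := hacc q rfl
          simp [altStep, ht, this]
      rw [this]
      exact altFold_keep_zero f rest k
    · have hmem' : t ∈ rest := by
        rcases List.mem_cons.mp hmem with h | h
        · exact absurd h.symm hk
        · exact h
      have hpos' : ∀ k' ∈ rest, k' ≠ t → ∀ i, f k' = some i → 0 < i :=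
        fun k' hk' => hpos k' (List.mem_cons_of_mem _ hk')
      cases hf : f k with
      | none =>
        rw [show altStep f acc k = acc by simp [altStep, hf]]
        exact ih acc hmem' hpos' hacc
      | some i =>
        have hipos : 0 < i := hpos k (List.mem_cons_self) hk i hf
        cases acc with
        | none =>
          rw [show altStep f none k = some (i, k) by simp [altStep, hf]]
          exact ih _ hmem' hpos' (by rintro q ⟨rfl⟩; exact hipos)
        | some q =>
          have hq : 0 < q.1 := hacc q rfl
          by_cases hlt : i < q.1
          · rw [show altStep f (some q) k = some (i, k) by simp [altStep, hf, hlt]]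
            exact ih _ hmem' hpos' (by rintro q' ⟨rfl⟩; exact hipos)
          · rw [show altStep f (some q) k = some q by simp [altStep, hf, hlt]]
            exact ih _ hmem' hpos' (by rintro q' ⟨rfl⟩; exact hq)

-- the keyword loop selects exactly the first element of the list that is a subtype
theorem altFold_find (st : List String) :
    (pvSubtypeKeys.foldl (altStep (PySem.List.index? st)) none).map Prod.snd =
      st.find? (fun t => pvSubtypeKeys.contains t) := by
  induction st with
  | nil =>
    rw [altFold_none _ _ _ (fun k _ => by
      simp)]
    rfl
  | cons t rest ih =>
    by_cases hp : pvSubtypeKeys.contains t = true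
    · rw [altFold_zero (PySem.List.index? (t :: rest)) pvSubtypeKeys t none
        (PySem.List.index?_cons_self t rest) (by simpa using hp)
        (fun k _ hk i hfi => by
          rw [PySem.List.index?_cons_of_ne (h := Ne.symm hk)] at hfi
          rcases Option.map_eq_some_iff.mp hfi with ⟨j, _, hji⟩
          omega)
        (by rintro q ⟨⟩)]
      rw [List.find?_cons_of_pos (h := by simpa using hp)]; rfl
    · have hne : ∀ k ∈ pvSubtypeKeys, k ≠ t := by
        intro k hk hkt
        exact hp (by subst hkt; simpa using hk)
      rw [altFold_congr (PySem.List.index? (t :: rest))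
        (fun k => (PySem.List.index? rest k).map (· + 1)) pvSubtypeKeys none
        (fun k hk => PySem.List.index?_cons_of_ne rest (Ne.symm (hne k hk)))]
      have := altFold_shift (PySem.List.index? rest) pvSubtypeKeys none
      simp only [Option.map_none] at this
      rw [this, List.find?_cons_of_neg (h := by simpa using hp), ← ih, Option.map_map]
      rfl

theorem fallback_gist_type_py_spec : Claim_equal_fallback_gist_type_py := by
  intro st _
  unfold Spec_fallback_gist_type_py fallback_gist_type_py fallback_gist_type_py_alt
  have hfind := altFold_find st
  rw [← List.head?_filter] at hfind
  cases hfold : pvSubtypeKeys.foldl (altStep (PySem.List.index? st)) none with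
  | some q =>
    rw [hfold] at hfind
    cases hm : st.filter (fun t => pvConstraintSubtypes.contains t) with
    | nil =>
      rw [show (fun t => pvConstraintSubtypes.contains t) =
        (fun t => pvSubtypeKeys.contains t) from rfl] at hm
      rw [hm] at hfind; simp at hfind
    | cons a l =>
      have : a = q.2 := by
        rw [show (fun t => pvConstraintSubtypes.contains t) =
          (fun t => pvSubtypeKeys.contains t) from rfl] at hm
        rw [hm] at hfind
        simpa using hfind.symm
      simp only [List.length_cons, List.headD_cons, this]
      split_ifs <;> first | rfl | omega
  | none =>
    rw [hfold] at hfind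
    cases hm : st.filter (fun t => pvConstraintSubtypes.contains t) with
    | cons a l =>
      rw [show (fun t => pvConstraintSubtypes.contains t) =
        (fun t => pvSubtypeKeys.contains t) from rfl] at hm
      rw [hm] at hfind; simp at hfind
    | nil =>
      simp only [List.length_nil]
      rw [if_neg (by omega), if_neg (by omega)]
      simp [altFallback, pvFallbackTable]
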